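-- pv_equiv track=rewrite | github.com/JA-WRI/Python-Projects | Word_Search.py | direction_word_given_position
-- ===== SOURCE A (Python) =====
-- right_direction = 1 #moving forward through a word list
--
-- left_direction = -1 #moving backwards through a word list
--
-- def is_outside_list(letter_list, index):
--
--     """
--     (list of strings, int) --> Boolean (True or False)
--
--     function will return True if the the index is out of bounds
--     with regards to the length of the list. It will return False is
--     index is inside the bounds with regard to the length of the list
--
--     Examples:
--     >>> is_outside_list(['A','B','C','D'], 1)
--     False
--     >>> is_outside_list(['A','B','C','D'], 0)
--     False
--     >>> is_outside_list(['A','B','C','D'], -1)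
--     True
--
--     """
--
--     if 0 <= index <= len(letter_list)-1 :
--         return False
--     else:
--         return True
--
-- def valid_word_pos_direction(letter_list,word,index,direction):
--     """
--     (list of string, string, int, int) -> Boolean (True or False)
--
--     Function will return Boolean value indicating if the given word can
--     be found in the letter list, at a given index and direction
--
--     Examples:
--     >>> valid_word_pos_direction( ['A','B','C','D','C','M'],'ABC',0,1)
--     True
--     >>>valid_word_pos_direction( ['A','B','C','D','C','M'],'DCB',3,-1)
--     True
--     >>> valid_word_pos_direction( ['A','B','C','D','C','M'],'AMC',0,-1)
--     False
--     """
--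
--     for letter in word:
--
--         if is_outside_list(letter_list, index) == True:
--             return False
--         if letter_list[index]==letter:
--             index +=direction
--         elif letter_list[index] != letter:
--             return False
--
--     return True
--
-- def direction_word_given_position(letter_list,word,index):
--     """
--     (list of string,string,int) --> list of integers
--
--     Function wil print a list of directions in which the given word was found
--     from the letter list, at a given index
--
--     Examples:
--
--     >>> direction_word_given_position(['A','M','C','D','C','M'],'DCM',3)
--     [-1, 1]
--     >>> direction_word_given_position(['A','B','C','D','C','M'],'CBA',2)
--     [-1]
--     >>> direction_word_given_position(['A','B','C','D','C','M'],'ABC',0)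
--     [1]
--     """
--
--     result = []
--     for letter in word:
--         if letter_list[index] != letter:
--             return result
--
--         if valid_word_pos_direction(letter_list,word,index,left_direction)==True:
--             result.append(left_direction)
--
--         if valid_word_pos_direction(letter_list,word,index,right_direction)==True:
--             result.append(right_direction)
--
--     return result
-- ===== SOURCE B (Python) =====
-- def word_matches(letter_list, word, index, direction):
--     for offset, letter in enumerate(word):
--         i = index + direction * offset
--         if i < 0 or i >= len(letter_list) or letter_list[i] != letter:
--             return False
--     return True
--
-- def direction_word_given_position(letter_list, word, index):
--     if not word:
--         return []
--     directions = []
--     if word_matches(letter_list, word, index, -1):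
--         directions.append(-1)
--     if word_matches(letter_list, word, index, 1):
--         directions.append(1)
--     return directions
-- ===== Notes on version B (the rewrite author's own statement) =====
-- stated objective: simpler
-- what changed: B checks each direction once with a single bounds-checked scan and returns each found direction at most once, instead of A's outer loop over the word that re-runs both full directional scans at every matching leading letter; Pre_ excludes only the inputs (non-empty word, index out of range) on which A raises IndexError.
-- intended difference: On inputs where the word (length >= 2) starts with two equal letters and actually occurs at index in some direction, A appends the found directions once per letter of the word's leading run (e.g. [1, 1] for 'AA'), while B returns each found direction exactly once ([1]), which is the intended 'list of directions in which the word was found'. — e.g. on direction_word_given_position(["A", "A", "A"], "AA", 0): A returns [1, 1], B returns [1]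
import Mathlib
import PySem

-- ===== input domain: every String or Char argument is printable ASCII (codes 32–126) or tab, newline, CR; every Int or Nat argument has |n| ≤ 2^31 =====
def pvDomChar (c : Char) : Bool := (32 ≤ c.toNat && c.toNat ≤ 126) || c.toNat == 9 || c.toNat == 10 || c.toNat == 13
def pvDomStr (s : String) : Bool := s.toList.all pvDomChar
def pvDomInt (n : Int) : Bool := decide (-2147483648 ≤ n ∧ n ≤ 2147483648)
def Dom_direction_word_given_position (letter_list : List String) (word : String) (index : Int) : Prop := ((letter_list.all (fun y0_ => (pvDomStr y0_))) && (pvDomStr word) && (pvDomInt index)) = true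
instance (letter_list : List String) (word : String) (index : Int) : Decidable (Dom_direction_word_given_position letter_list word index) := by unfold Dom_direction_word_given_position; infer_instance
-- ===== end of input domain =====

-- B checks each direction once with a single bounds-checked scan and returns each found
-- direction at most once (objective: simpler); A repeats the found directions once per
-- matching leading letter of the word (the D_ region below) and raises IndexError on an
-- out-of-range index (excluded by Pre_; B would return [] there).


-- ===== PORT A =====
def is_outside_list (letter_list : List String) (index : Int) : Bool :=
  if 0 ≤ index ∧ index ≤ (letter_list.length : Int) - 1 then false else true

-- the for-loop of valid_word_pos_direction, one step per character of the word
def validLoop (letter_list : List String) (chars : List Char) (index direction : Int) : Bool :=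
  match chars with
  | [] => true
  | letter :: rest =>
    if is_outside_list letter_list index = true then false
    else
      match PySem.List.pyGet? letter_list index with
      | none => false  -- unreachable: is_outside_list already returned true on out-of-range index
      | some s =>
        if s.toList = [letter] then validLoop letter_list rest (index + direction) direction
        else false

def valid_word_pos_direction (letter_list : List String) (word : String) (index direction : Int) : Bool :=
  validLoop letter_list word.toList index direction

-- the for-loop of direction_word_given_position, accumulating `result`
def awLoop (letter_list : List String) (word : String) (index : Int)
    (chars : List Char) (result : List Int) : List Int :=
  match chars with
  | [] => result
  | letter :: rest =>
    match PySem.List.pyGet? letter_list index with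
    | none => result  -- Python raises IndexError here; such inputs are excluded by Pre_
    | some s =>
      if s.toList ≠ [letter] then result
      else
        let r1 := if valid_word_pos_direction letter_list word index (-1) = true then result ++ [-1] else result
        let r2 := if valid_word_pos_direction letter_list word index 1 = true then r1 ++ [1] else r1
        awLoop letter_list word index rest r2

def direction_word_given_position (letter_list : List String) (word : String) (index : Int) : List Int :=
  awLoop letter_list word index word.toList []

-- ===== PORT B =====
-- the for-loop of Source B's word_matches, one step per (offset, letter) pair of enumerate(word)
def bMatches (letter_list : List String) (pairs : List (Int × Char)) (index direction : Int) : Bool :=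
  match pairs with
  | [] => true
  | (offset, letter) :: rest =>
    let i := index + direction * offset
    if i < 0 ∨ (letter_list.length : Int) ≤ i then false
    else
      match PySem.List.pyGet? letter_list i with
      | none => false  -- unreachable: i is in range here
      | some s =>
        if s.toList = [letter] then bMatches letter_list rest index direction
        else false

def direction_word_given_position_alt (letter_list : List String) (word : String) (index : Int) : List Int :=
  if word.toList = [] then []
  else
    let d1 : List Int := if bMatches letter_list (PySem.List.enumerate word.toList 0) index (-1) then [-1] else []
    let d2 : List Int := if bMatches letter_list (PySem.List.enumerate word.toList 0) index 1 then d1 ++ [1] else d1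
    d2

-- ===== PRECONDITION & SPEC =====
-- Pre_ excludes exactly the inputs where Python A raises IndexError: a non-empty word with
-- `index` outside [-len(letter_list), len(letter_list)).
def Pre_direction_word_given_position (letter_list : List String) (word : String) (index : Int) : Prop :=
  word.toList = [] ∨ PySem.Raise.InRange letter_list.length index
instance (letter_list : List String) (word : String) (index : Int) : Decidable (Pre_direction_word_given_position letter_list word index) := by unfold Pre_direction_word_given_position; infer_instance

def pvWitness_direction_word_given_position : List String × String × Int := (["A", "B", "C"], "ABC", 0)

-- the word (as singleton strings) occurs contiguously in letter_list starting at position i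
def pvOcc (l : List String) (cs : List Char) (i : Int) : Prop :=
  0 ≤ i ∧ cs.map String.singleton <+: l.drop i.toNat

-- On inputs where the word (length ≥ 2) starts with two equal letters and actually occurs at
-- index in some direction, A appends the found directions once per letter of the word's leading
-- run (e.g. [1, 1] for "AA"), while B returns each found direction exactly once ([1]), which is
-- the intended "list of directions in which the word was found".
def D_direction_word_given_position (letter_list : List String) (word : String) (index : Int) : Prop :=
  2 ≤ word.toList.length ∧ word.toList[0]? = word.toList[1]? ∧
    (pvOcc letter_list word.toList.reverse (index - ((word.toList.length : Int) - 1)) ∨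
     pvOcc letter_list word.toList index)
instance (letter_list : List String) (word : String) (index : Int) : Decidable (D_direction_word_given_position letter_list word index) := by unfold D_direction_word_given_position pvOcc; infer_instance

def Spec_direction_word_given_position (letter_list : List String) (word : String) (index : Int) (out : List Int) : Prop := ¬ D_direction_word_given_position letter_list word index → out = direction_word_given_position_alt letter_list word index
instance (letter_list : List String) (word : String) (index : Int) (out : List Int) : Decidable (Spec_direction_word_given_position letter_list word index out) := by unfold Spec_direction_word_given_position; infer_instance

def pvDiffWitness_direction_word_given_position : List String × String × Int := (["A", "A", "A"], "AA", 0)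
def pvDiffWitnessOut_direction_word_given_position : (List Int) × (List Int) := ([1, 1], [1])

-- ===== CLAIM (what is proved, stated in full; the proofs are below) =====
def Claim_unchanged_direction_word_given_position : Prop := ∀ (letter_list : List String) (word : String) (index : Int), Dom_direction_word_given_position letter_list word index → Pre_direction_word_given_position letter_list word index → Spec_direction_word_given_position letter_list word index (direction_word_given_position letter_list word index)
def Claim_changed_direction_word_given_position : Prop := Dom_direction_word_given_position (pvDiffWitness_direction_word_given_position.1) (pvDiffWitness_direction_word_given_position.2.1) (pvDiffWitness_direction_word_given_position.2.2) ∧ Pre_direction_word_given_position (pvDiffWitness_direction_word_given_position.1) (pvDiffWitness_direction_word_given_position.2.1) (pvDiffWitness_direction_word_given_position.2.2) ∧ D_direction_word_given_position (pvDiffWitness_direction_word_given_position.1) (pvDiffWitness_direction_word_given_position.2.1) (pvDiffWitness_direction_word_given_position.2.2) ∧ direction_word_given_position (pvDiffWitness_direction_word_given_position.1) (pvDiffWitness_direction_word_given_position.2.1) (pvDiffWitness_direction_word_given_position.2.2) = pvDiffWitnessOut_direction_word_given_position.1 ∧ direction_word_given_position_alt (pvDiffWitness_direction_word_given_position.1)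 (pvDiffWitness_direction_word_given_position.2.1) (pvDiffWitness_direction_word_given_position.2.2) = pvDiffWitnessOut_direction_word_given_position.2 ∧ pvDiffWitnessOut_direction_word_given_position.1 ≠ pvDiffWitnessOut_direction_word_given_position.2
def Claim_exact_direction_word_given_position : Prop := ∀ (letter_list : List String) (word : String) (index : Int), Dom_direction_word_given_position letter_list word index → Pre_direction_word_given_position letter_list word index → D_direction_word_given_position letter_list word index → direction_word_given_position letter_list word index ≠ direction_word_given_position_alt letter_list word index

-- ===== LEMMAS AND PROOFS =====

-- k = length of the leading run of the word's characters equal to `first`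
def leadRun (first : String) : List Char → Nat
  | [] => 0
  | ch :: rest => if [ch] = first.toList then leadRun first rest + 1 else 0

-- A's validity loop, characterised position by position
theorem validLoop_iff (letter_list : List String) (chars : List Char) (index direction : Int) :
    validLoop letter_list chars index direction = true ↔
      ∀ j : Nat, j < chars.length →
        0 ≤ index + direction * (j : Int) ∧ index + direction * (j : Int) < (letter_list.length : Int) ∧
          (letter_list.getD (index + direction * (j : Int)).toNat "").toList = [chars.getD j ' '] := by
  induction chars generalizing index with
  | nil => simp [validLoop]
  | cons c rest ih =>
    by_cases hb : 0 ≤ index ∧ index ≤ (letter_list.length : Int) - 1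
    · have hlt : index.toNat < letter_list.length := by omega
      have hget : PySem.List.pyGet? letter_list index = some letter_list[index.toNat] :=
        PySem.List.pyGet?_eq_some_getElem letter_list hb.1 (by omega)
      have hD : (letter_list.getD index.toNat "").toList = letter_list[index.toNat].toList := by
        rw [List.getD_eq_getElem letter_list "" hlt]
      by_cases heq : letter_list[index.toNat].toList = [c]
      · have hL : validLoop letter_list (c :: rest) index direction =
            validLoop letter_list rest (index + direction) direction := by
          simp [validLoop, is_outside_list, hb, hget, heq]
        rw [hL, ih]
        constructor
        · intro h j hj
          cases j with
          | zero =>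
            refine ⟨by simpa using hb.1, by simpa using (by omega : index < (letter_list.length : Int)), ?_⟩
            simp only [Nat.cast_zero, mul_zero, add_zero, List.getD_cons_zero]
            rw [hD]; exact heq
          | succ j' =>
            have h2 := h j' (by simpa using Nat.lt_of_succ_lt_succ hj)
            have harith : index + direction * ((j' + 1 : Nat) : Int) =
                index + direction + direction * ((j' : Nat) : Int) := by push_cast; ring
            rw [harith]
            simpa using h2
        · intro h j hj
          have h2 := h (j + 1) (by simpa using Nat.succ_lt_succ hj)
          have harith : index + direction * ((j + 1 : Nat) : Int) =
              index + direction + direction * ((j : Nat) : Int) := by push_cast; ring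
          rw [harith] at h2
          simpa using h2
      · have hL : validLoop letter_list (c :: rest) index direction = false := by
          simp [validLoop, is_outside_list, hb, hget, heq]
        rw [hL]
        simp only [Bool.false_eq_true, false_iff]
        intro h
        have h0 := (h 0 (by simp)).2.2
        simp only [Nat.cast_zero, mul_zero, add_zero, List.getD_cons_zero] at h0
        rw [hD] at h0
        exact heq h0
    · have hL : validLoop letter_list (c :: rest) index direction = false := by
        simp only [validLoop, is_outside_list]
        split
        · next hP => exact absurd hP hb
        · simp
      rw [hL]
      simp only [Bool.false_eq_true, false_iff]
      intro h
      have h0 := h 0 (by simp)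
      simp only [Nat.cast_zero, mul_zero, add_zero] at h0
      omega

-- Source B's word_matches loop equals A's validity loop
theorem bMatches_eq (letter_list : List String) (chars : List Char) (index direction : Int) :
    ∀ n : Int, bMatches letter_list (PySem.List.enumerate chars n) index direction =
      validLoop letter_list chars (index + direction * n) direction := by
  intro n
  induction chars generalizing n with
  | nil => simp [PySem.List.enumerate_nil, bMatches, validLoop]
  | cons c rest ih =>
    rw [PySem.List.enumerate_cons]
    by_cases hb : 0 ≤ index + direction * n ∧ index + direction * n ≤ (letter_list.length : Int) - 1
    · obtain ⟨s, hget⟩ : ∃ s, PySem.List.pyGet? letter_list (index + direction * n) = some s := by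
        cases hq : PySem.List.pyGet? letter_list (index + direction * n) with
        | none => exact absurd ⟨by omega, by omega⟩ ((PySem.List.pyGet?_eq_none_iff _ _).1 hq)
        | some s => exact ⟨s, rfl⟩
      have hstep : index + direction * n + direction = index + direction * (n + 1) := by ring
      by_cases heq : s.toList = [c]
      · simp only [bMatches, validLoop, is_outside_list, hb, and_self, if_true, hget, heq]
        rw [if_neg (by omega), ih, hstep]
        simp
      · simp only [bMatches, validLoop, is_outside_list]
        rw [if_neg (by omega)]
        simp [hget, heq, hb]
    · simp only [bMatches, validLoop, is_outside_list]
      rw [if_pos (by omega)]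
      split
      · next hP => exact absurd hP hb
      · rfl

-- A's main loop appends the same two-sided pattern once per leading-run character
theorem awLoop_eq (letter_list : List String) (word : String) (index : Int) (s : String)
    (hget : PySem.List.pyGet? letter_list index = some s) :
    ∀ (chars : List Char) (result : List Int),
      awLoop letter_list word index chars result =
        result ++ (List.replicate (leadRun s chars)
          ((if valid_word_pos_direction letter_list word index (-1) = true then [(-1 : Int)] else []) ++
           (if valid_word_pos_direction letter_list word index 1 = true then [(1 : Int)] else []))).flatten := by
  intro chars
  induction chars with
  | nil => intro result; simp [awLoop, leadRun]
  | cons c rest ih =>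
    intro result
    by_cases heq : s.toList = [c]
    · have hrun : leadRun s (c :: rest) = leadRun s rest + 1 := by
        simp [leadRun, heq]
      simp only [awLoop, hget, heq, ne_eq, not_true_eq_false, if_false, hrun]
      rw [ih]
      by_cases hL : valid_word_pos_direction letter_list word index (-1) = true <;>
        by_cases hR : valid_word_pos_direction letter_list word index 1 = true <;>
          simp [hL, hR, List.replicate_succ]
    · have hrun : leadRun s (c :: rest) = 0 := by
        simp only [leadRun, ite_eq_right_iff]
        intro hc
        exact absurd hc.symm heq
      simp [awLoop, hget, heq, hrun]

-- pvOcc, characterised position by position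
theorem pvOcc_iff (l : List String) (cs : List Char) (i : Int) (hne : cs ≠ []) :
    pvOcc l cs i ↔
      0 ≤ i ∧ i + (cs.length : Int) ≤ (l.length : Int) ∧
        ∀ j : Nat, j < cs.length → (l.getD (i + (j : Int)).toNat "").toList = [cs.getD j ' '] := by
  have hm : 1 ≤ cs.length := by cases cs with | nil => exact absurd rfl hne | cons c r => simp
  unfold pvOcc
  rw [List.prefix_iff_getElem?]
  constructor
  · rintro ⟨h0, hp⟩
    have hlen : ∀ j : Nat, j < cs.length → i.toNat + j < l.length := by
      intro j hj
      have := hp j (by simpa using hj)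
      rw [List.getElem?_drop] at this
      obtain ⟨h2, -⟩ := List.getElem?_eq_some_iff.1 this
      omega
    refine ⟨h0, by have := hlen (cs.length - 1) (by omega); omega, ?_⟩
    intro j hj
    have hp2 := hp j (by simpa using hj)
    rw [List.getElem?_drop] at hp2
    have hlt : i.toNat + j < l.length := hlen j hj
    have hval : l[i.toNat + j] = String.singleton cs[j] := by
      obtain ⟨_, hv⟩ := List.getElem?_eq_some_iff.1 hp2
      simpa using hv
    have htn : (i + (j : Int)).toNat = i.toNat + j := by omega
    rw [htn, List.getD_eq_getElem l "" hlt, hval, List.getD_eq_getElem cs ' ' hj]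
    simp
  · rintro ⟨h0, hlen, hall⟩
    refine ⟨h0, ?_⟩
    intro j hj
    simp only [List.length_map] at hj
    have hlt : i.toNat + j < l.length := by omega
    have h1 := hall j hj
    have htn : (i + (j : Int)).toNat = i.toNat + j := by omega
    rw [htn, List.getD_eq_getElem l "" hlt, List.getD_eq_getElem cs ' ' hj] at h1
    have hval : l[i.toNat + j] = String.singleton cs[j] := by
      apply String.toList_inj.1
      rw [h1]; simp
    rw [List.getElem?_drop]
    rw [List.getElem?_eq_some_iff]
    exact ⟨hlt, by simp [hval]⟩

-- rightward occurrence is exactly A's validity loop with direction +1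
theorem pvOccR_iff (l : List String) (cs : List Char) (i : Int) (hne : cs ≠ []) :
    pvOcc l cs i ↔ validLoop l cs i 1 = true := by
  have hm : 1 ≤ cs.length := by cases cs with | nil => exact absurd rfl hne | cons c r => simp
  rw [pvOcc_iff l cs i hne, validLoop_iff]
  constructor
  · rintro ⟨h0, hlen, hall⟩ j hj
    have hji : (j : Int) < (cs.length : Int) := by exact_mod_cast hj
    refine ⟨by omega, by omega, ?_⟩
    have := hall j hj
    simpa using this
  · intro h
    have h0 := (h 0 (by omega)).1
    simp only [Nat.cast_zero, mul_zero, add_zero] at h0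
    have hl := (h (cs.length - 1) (by omega)).2.1
    have hc : ((cs.length - 1 : Nat) : Int) = (cs.length : Int) - 1 := by omega
    rw [one_mul, hc] at hl
    refine ⟨h0, by omega, ?_⟩
    intro j hj
    have := (h j hj).2.2
    simpa using this

-- leftward occurrence is exactly A's validity loop with direction -1
theorem pvOccL_iff (l : List String) (cs : List Char) (i : Int) (hne : cs ≠ []) :
    pvOcc l cs.reverse (i - ((cs.length : Int) - 1)) ↔ validLoop l cs i (-1) = true := by
  have hm : 1 ≤ cs.length := by cases cs with | nil => exact absurd rfl hne | cons c r => simp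
  rw [pvOcc_iff l cs.reverse _ (by simpa using hne), validLoop_iff]
  constructor
  · rintro ⟨h0, hlen, hall⟩ j hj
    simp only [List.length_reverse] at hlen hall
    have hji : (j : Int) < (cs.length : Int) := by exact_mod_cast hj
    refine ⟨by omega, by omega, ?_⟩
    have h1 := hall (cs.length - 1 - j) (by omega)
    have harith : i - ((cs.length : Int) - 1) + ((cs.length - 1 - j : Nat) : Int) = i + -1 * (j : Int) := by
      push_cast [Nat.cast_sub (by omega : j ≤ cs.length - 1), Nat.cast_sub (by omega : 1 ≤ cs.length)]
      ring
    rw [harith] at h1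
    rw [h1]
    have hrev : cs.reverse.getD (cs.length - 1 - j) ' ' = cs.getD j ' ' := by
      rw [List.getD_eq_getElem cs.reverse ' ' (by simp; omega), List.getD_eq_getElem cs ' ' hj]
      rw [List.getElem_reverse]
      congr 1
      omega
    rw [hrev]
  · intro h
    have h0 := (h (cs.length - 1) (by omega)).1
    have hc : ((cs.length - 1 : Nat) : Int) = (cs.length : Int) - 1 := by omega
    rw [hc] at h0
    have hl := (h 0 (by omega)).2.1
    simp only [Nat.cast_zero, mul_zero, add_zero] at hl
    refine ⟨by omega, by simp; omega, ?_⟩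
    intro j hj
    simp only [List.length_reverse] at hj
    have h1 := (h (cs.length - 1 - j) (by omega)).2.2
    have harith : i + -1 * ((cs.length - 1 - j : Nat) : Int) = i - ((cs.length : Int) - 1) + (j : Int) := by
      push_cast [Nat.cast_sub (by omega : j ≤ cs.length - 1), Nat.cast_sub (by omega : 1 ≤ cs.length)]
      ring
    rw [harith] at h1
    rw [h1]
    have hrev : cs.reverse.getD j ' ' = cs.getD (cs.length - 1 - j) ' ' := by
      rw [List.getD_eq_getElem cs.reverse ' ' (by simp; omega), List.getD_eq_getElem cs ' ' (by omega)]
      rw [List.getElem_reverse]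
    rw [hrev]

-- if the word matches in some direction, the letter at the index is the word's first letter
theorem first_char_eq (letter_list : List String) (word : String) (index : Int) (s : String)
    (hget : PySem.List.pyGet? letter_list index = some s) (c0 : Char) (rest0 : List Char)
    (hwl : word.toList = c0 :: rest0) (d : Int)
    (hv : valid_word_pos_direction letter_list word index d = true) : s.toList = [c0] := by
  have h := (validLoop_iff letter_list word.toList index d).1 hv 0 (by rw [hwl]; simp)
  simp only [Nat.cast_zero, mul_zero, add_zero] at h
  obtain ⟨h0, h1, h2⟩ := h
  have hlt : index.toNat < letter_list.length := by omega
  have hg2 : PySem.List.pyGet? letter_list index = some letter_list[index.toNat] :=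
    PySem.List.pyGet?_eq_some_getElem letter_list h0 (by omega)
  have hs : s = letter_list[index.toNat] := by
    rw [hg2] at hget; exact (Option.some.inj hget).symm
  rw [hs, ← List.getD_eq_getElem letter_list "" hlt, h2, hwl]
  simp

-- ===== VERDICT (by name: the statement is the Claim_ definition above) =====
theorem direction_word_given_position_spec : Claim_unchanged_direction_word_given_position := by
  intro l w i _dom hpre hnd
  by_cases hw : w.toList = []
  · simp [direction_word_given_position, direction_word_given_position_alt, awLoop, hw]
  · have hin : PySem.Raise.InRange l.length i := hpre.resolve_left hw
    obtain ⟨s, hget⟩ : ∃ s, PySem.List.pyGet? l i = some s := by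
      cases hq : PySem.List.pyGet? l i with
      | none => exact absurd ((PySem.List.pyGet?_eq_none_iff _ _).1 hq) (not_not_intro hin)
      | some s => exact ⟨s, rfl⟩
    obtain ⟨c0, rest0, hwl⟩ := List.exists_cons_of_ne_nil hw
    have hBM : ∀ d, bMatches l (PySem.List.enumerate w.toList 0) i d = valid_word_pos_direction l w i d := by
      intro d
      rw [bMatches_eq]
      simp [valid_word_pos_direction]
    rw [direction_word_given_position, awLoop_eq l w i s hget w.toList [], List.nil_append,
      direction_word_given_position_alt, if_neg hw]
    simp only [hBM]
    by_cases hbase : valid_word_pos_direction l w i (-1) = true ∨ valid_word_pos_direction l w i 1 = true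
    · have hs0 : s.toList = [c0] := by
        rcases hbase with h | h
        · exact first_char_eq l w i s hget c0 rest0 hwl _ h
        · exact first_char_eq l w i s hget c0 rest0 hwl _ h
      have e0 : [c0] = s.toList := hs0.symm
      have hrest : leadRun s rest0 = 0 := by
        cases rest0 with
        | nil => simp [leadRun]
        | cons c1 t =>
          by_cases hc1 : [c1] = s.toList
          · exfalso
            apply hnd
            have hc10 : c1 = c0 := by
              have : [c1] = [c0] := by rw [hc1, hs0]
              exact List.cons.inj this |>.1
            refine ⟨by rw [hwl]; simp, by rw [hwl]; simp [hc10], ?_⟩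
            rcases hbase with h | h
            · exact Or.inl ((pvOccL_iff l w.toList i hw).2 h)
            · exact Or.inr ((pvOccR_iff l w.toList i hw).2 h)
          · simp [leadRun, hc1]
      have hk1 : leadRun s w.toList = 1 := by
        rw [hwl]
        simp [leadRun, e0, hrest]
      rw [hk1]
      by_cases hR : valid_word_pos_direction l w i 1 = true <;> simp [hR]
    · rw [not_or, Bool.not_eq_true, Bool.not_eq_true] at hbase
      simp [hbase.1, hbase.2]

theorem direction_word_given_position_changed : Claim_changed_direction_word_given_position := by
  unfold Claim_changed_direction_word_given_position; decide

theorem direction_word_given_position_tight : Claim_exact_direction_word_given_position := by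
  intro l w i _dom hpre hd
  obtain ⟨hlen2, h01, hocc⟩ := hd
  have hw : w.toList ≠ [] := by
    intro h; rw [h] at hlen2; simp at hlen2
  have hin : PySem.Raise.InRange l.length i := hpre.resolve_left hw
  obtain ⟨s, hget⟩ : ∃ s, PySem.List.pyGet? l i = some s := by
    cases hq : PySem.List.pyGet? l i with
    | none => exact absurd ((PySem.List.pyGet?_eq_none_iff _ _).1 hq) (not_not_intro hin)
    | some s => exact ⟨s, rfl⟩
  obtain ⟨c0, rest0, hwl⟩ := List.exists_cons_of_ne_nil hw
  have hr0 : rest0 ≠ [] := by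
    intro h; rw [hwl, h] at hlen2; simp at hlen2
  obtain ⟨c1, t, hwl2⟩ := List.exists_cons_of_ne_nil hr0
  have hvalid : valid_word_pos_direction l w i (-1) = true ∨ valid_word_pos_direction l w i 1 = true := by
    rcases hocc with h | h
    · exact Or.inl ((pvOccL_iff l w.toList i hw).1 h)
    · exact Or.inr ((pvOccR_iff l w.toList i hw).1 h)
  have hs0 : s.toList = [c0] := by
    rcases hvalid with h | h
    · exact first_char_eq l w i s hget c0 rest0 hwl _ h
    · exact first_char_eq l w i s hget c0 rest0 hwl _ h
  have hc10 : c1 = c0 := by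
    rw [hwl, hwl2] at h01
    simpa using h01.symm
  have e0 : [c0] = s.toList := hs0.symm
  have e1 : [c1] = s.toList := by rw [hc10]; exact e0
  have hk : leadRun s w.toList = leadRun s t + 2 := by
    rw [hwl, hwl2]
    simp [leadRun, e0, e1]
  have hBM : ∀ d, bMatches l (PySem.List.enumerate w.toList 0) i d = valid_word_pos_direction l w i d := by
    intro d
    rw [bMatches_eq]
    simp [valid_word_pos_direction]
  rw [direction_word_given_position, awLoop_eq l w i s hget w.toList [], List.nil_append,
    direction_word_given_position_alt, if_neg hw]
  simp only [hBM]
  intro heq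
  have hlen := congrArg List.length heq
  rw [hk] at hlen
  simp only [List.length_flatten, List.map_replicate, List.sum_replicate, smul_eq_mul] at hlen
  by_cases h1 : valid_word_pos_direction l w i (-1) = true <;>
    by_cases h2 : valid_word_pos_direction l w i 1 = true
  · simp [h1, h2] at hlen
  · simp [h1, h2] at hlen
  · simp [h1, h2] at hlen
  · rcases hvalid with h | h
    · exact h1 h
    · exact h2 h
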